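-- pv_equiv track=rewrite | github.com/vincenzo5/backtester-mvp | backtest/walkforward/param_grid.py | count_parameter_combinations
-- ===== SOURCE A (Python) =====
-- from typing import Dict, List, Any
--
-- def generate_parameter_values(start: int, end: int, step: int) -> List[int]:
--     """
--     Generate list of parameter values from range specification.
--
--     Args:
--         start: Starting value (inclusive)
--         end: Ending value (inclusive)
--         step: Step size
--
--     Returns:
--         List of parameter values
--
--     Examples:
--         >>> generate_parameter_values(10, 30, 5)
--         [10, 15, 20, 25, 30]
--         >>> generate_parameter_values(20, 40, 10)
--         [20, 30, 40]
--     """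
--     if start > end:
--         raise ValueError(f"Start value ({start}) must be <= end value ({end})")
--
--     if step <= 0:
--         raise ValueError(f"Step size ({step}) must be > 0")
--
--     values = []
--     current = start
--     while current <= end:
--         values.append(current)
--         current += step
--
--     return values
--
-- def count_parameter_combinations(parameter_ranges: Dict[str, Dict[str, int]]) -> int:
--     """
--     Count total number of parameter combinations without generating them.
--
--     Useful for progress estimation.
--
--     Args:
--         parameter_ranges: Dictionary mapping parameter names to range specs
--
--     Returns:
--         Total number of combinations
--     """
--     if not parameter_ranges:
--         return 1
--
--     total = 1
--     for param_name, range_spec in parameter_ranges.items():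
--         start = range_spec.get('start', 0)
--         end = range_spec.get('end', 0)
--         step = range_spec.get('step', 1)
--
--         if step <= 0:
--             continue
--
--         count = len(generate_parameter_values(start, end, step))
--         total *= count
--
--     return total
-- ===== SOURCE B (Python) =====
-- def count_parameter_combinations(parameter_ranges):
--     total = 1
--     for range_spec in parameter_ranges.values():
--         start = range_spec.get('start', 0)
--         end = range_spec.get('end', 0)
--         step = range_spec.get('step', 1)
--         if step <= 0:
--             continue
--         if start > end:
--             raise ValueError(f"Start value ({start}) must be <= end value ({end})")
--         total *= (end - start) // step + 1
--     return total
-- ===== Notes on version B (the rewrite author's own statement) =====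
-- stated objective: simpler
-- what changed: B replaces A's per-range while-loop list materialization and len() with the arithmetic-progression count formula (end-start)//step+1, multiplying counts directly in one pass.
import Mathlib
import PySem

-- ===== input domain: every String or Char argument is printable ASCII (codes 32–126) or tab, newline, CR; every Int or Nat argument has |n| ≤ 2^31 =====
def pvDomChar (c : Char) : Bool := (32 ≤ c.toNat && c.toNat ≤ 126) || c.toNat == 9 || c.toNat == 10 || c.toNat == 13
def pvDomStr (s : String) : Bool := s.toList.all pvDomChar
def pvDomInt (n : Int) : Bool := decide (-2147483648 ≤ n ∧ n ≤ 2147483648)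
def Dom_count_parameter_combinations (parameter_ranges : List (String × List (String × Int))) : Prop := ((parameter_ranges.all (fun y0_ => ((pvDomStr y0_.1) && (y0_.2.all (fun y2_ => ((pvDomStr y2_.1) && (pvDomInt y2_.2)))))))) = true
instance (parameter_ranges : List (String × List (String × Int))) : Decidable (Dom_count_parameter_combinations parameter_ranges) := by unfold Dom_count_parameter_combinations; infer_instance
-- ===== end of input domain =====

-- B replaces A's per-range while-loop materialization by the closed-form progression length
-- (end-start)//step+1; equivalence of RETURN values is claimed on Pre_ (where A does not raise).

-- ===== PORT A =====
-- while current <= end: values.append(current); current += step   (called only with 0 < step)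
def pvGenLoop (current end_ step : Int) (h : 0 < step) : List Int :=
  if current ≤ end_ then current :: pvGenLoop (current + step) end_ step h else []
termination_by (end_ - current + 1).toNat
decreasing_by omega

-- generate_parameter_values; the two [] branches are where the Python raises ValueError
def pvGenValues (start end_ step : Int) : List Int :=
  if start > end_ then []
  else if h : step ≤ 0 then []
  else pvGenLoop start end_ step (by omega)

def count_parameter_combinations (parameter_ranges : List (String × List (String × Int))) : Int :=
  if parameter_ranges = [] then 1
  else
    parameter_ranges.foldl (fun total pr =>
      let spec := PySem.Dict.ofList pr.2
      let start := spec.getD "start" 0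
      let end_ := spec.getD "end" 0
      let step := spec.getD "step" 1
      if step ≤ 0 then total
      else total * ((pvGenValues start end_ step).length : Int)) 1

-- ===== PORT B =====
def count_parameter_combinations_alt (parameter_ranges : List (String × List (String × Int))) : Int :=
  parameter_ranges.foldl (fun total pr =>
    let spec := PySem.Dict.ofList pr.2
    let start := spec.getD "start" 0
    let end_ := spec.getD "end" 0
    let step := spec.getD "step" 1
    if step ≤ 0 then total
    else total * (PySem.Int.floordiv (end_ - start) step + 1)) 1

-- ===== PRECONDITION & SPEC =====
-- A (and B) raise ValueError on any range with step > 0 and start > end; Pre_ excludes exactly those.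
def Pre_count_parameter_combinations (parameter_ranges : List (String × List (String × Int))) : Prop :=
  ∀ pr ∈ parameter_ranges,
    (PySem.Dict.ofList pr.2).getD "step" 1 ≤ 0 ∨
    (PySem.Dict.ofList pr.2).getD "start" 0 ≤ (PySem.Dict.ofList pr.2).getD "end" 0
instance (parameter_ranges : List (String × List (String × Int))) : Decidable (Pre_count_parameter_combinations parameter_ranges) := by unfold Pre_count_parameter_combinations; infer_instance

def pvWitness_count_parameter_combinations : (List (String × List (String × Int))) :=
  [("fast", [("start", 1), ("end", 5), ("step", 2)]), ("slow", [("start", 0), ("end", 0)])]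

def Spec_count_parameter_combinations (parameter_ranges : List (String × List (String × Int))) (out : Int) : Prop := out = count_parameter_combinations_alt parameter_ranges
instance (parameter_ranges : List (String × List (String × Int))) (out : Int) : Decidable (Spec_count_parameter_combinations parameter_ranges out) := by unfold Spec_count_parameter_combinations; infer_instance

-- ===== CLAIM (what is proved, stated in full; the proofs are below) =====
def Claim_equal_count_parameter_combinations : Prop := ∀ (parameter_ranges : List (String × List (String × Int))), Dom_count_parameter_combinations parameter_ranges → Pre_count_parameter_combinations parameter_ranges → Spec_count_parameter_combinations parameter_ranges (count_parameter_combinations parameter_ranges)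

-- ===== LEMMAS AND PROOFS =====

theorem pvGenLoop_length (step : Int) (h : 0 < step) :
    ∀ (n : Nat) (current end_ : Int), current ≤ end_ → (end_ - current).toNat ≤ n →
      ((pvGenLoop current end_ step h).length : Int) = PySem.Int.floordiv (end_ - current) step + 1 := by
  intro n
  induction n with
  | zero =>
    intro current end_ hle hn
    have he : end_ = current := by omega
    rw [pvGenLoop, if_pos hle, pvGenLoop, if_neg (by omega)]
    have : PySem.Int.floordiv (end_ - current) step = 0 := by
      rw [PySem.Int.floordiv_eq_iff_of_pos h]; omega
    simp [this]
  | succ n ih =>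
    intro current end_ hle hn
    rw [pvGenLoop, if_pos hle]
    by_cases hnext : current + step ≤ end_
    · have := ih (current + step) end_ hnext (by omega)
      rw [pvGenLoop] at this ⊢
      simp only [List.length_cons] at this ⊢
      have hsplit : PySem.Int.floordiv (end_ - current) step
          = PySem.Int.floordiv (end_ - (current + step)) step + 1 := by
        rw [PySem.Int.floordiv_eq_ediv_of_pos h, PySem.Int.floordiv_eq_ediv_of_pos h]
        have : end_ - current = (end_ - (current + step)) + 1 * step := by ring
        rw [this, Int.add_mul_ediv_right _ _ (by omega : step ≠ 0)]
      omega
    · rw [pvGenLoop, if_neg hnext]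
      have : PySem.Int.floordiv (end_ - current) step = 0 := by
        rw [PySem.Int.floordiv_eq_iff_of_pos h]; omega
      simp [this]

theorem pvGenValues_length (start end_ step : Int) (hs : 0 < step) (hle : start ≤ end_) :
    ((pvGenValues start end_ step).length : Int) = PySem.Int.floordiv (end_ - start) step + 1 := by
  rw [pvGenValues, if_neg (by omega), dif_neg (by omega)]
  exact pvGenLoop_length step hs (end_ - start).toNat start end_ hle (by omega)

-- ===== VERDICT (by name: the statement is the Claim_ definition above) =====
theorem count_parameter_combinations_spec : Claim_equal_count_parameter_combinations := by
  intro prs _ hpre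
  unfold Spec_count_parameter_combinations count_parameter_combinations count_parameter_combinations_alt
  by_cases hnil : prs = []
  · simp [hnil]
  · rw [if_neg hnil]
    apply PySem.List.foldl_congr_mem'
    intro x hx total
    by_cases hstep : (PySem.Dict.ofList x.2).getD "step" 1 ≤ 0
    · simp [hstep]
    · have hle : (PySem.Dict.ofList x.2).getD "start" 0 ≤ (PySem.Dict.ofList x.2).getD "end" 0 := by
        rcases hpre x hx with h | h
        · omega
        · exact h
      simp only [if_neg hstep]
      rw [pvGenValues_length _ _ _ (by omega) hle]
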